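-- pv_equiv track=rewrite | github.com/konstantintuev/thesis_backend | file_processing/document_processor/basic_text_processing_utils.py | concat_chunks
-- ===== SOURCE A (Python) =====
-- def concat_chunks(chunks: list[str], min_length: int, max_length: int or None) -> list[str]:
--     def is_complete_sentence(text: str) -> bool:
--         return text.rstrip().endswith(('.', '!', '?'))
--
--     concatenated_chunks = []
--     i = 0
--
--     while i < len(chunks):
--         current_chunk = chunks[i].strip()
--
--         # Check if current chunk is too short or doesn't end with a complete sentence
--         while ((len(current_chunk) < min_length or not is_complete_sentence(current_chunk))
--                and i < len(chunks) - 1):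
--             next_chunk = chunks[i + 1].strip()
--             # If the concatted chunks is longer than max_length -> skip
--             if max_length is not None and len(current_chunk) + len(next_chunk) + 1 > max_length:
--                 break
--             i += 1
--             current_chunk += ' ' + next_chunk
--
--         concatenated_chunks.append(current_chunk)
--         i += 1
--
--     return concatenated_chunks
-- ===== SOURCE B (Python) =====
-- def concat_chunks(chunks: list[str], min_length: int, max_length: int or None) -> list[str]:
--     def is_complete_sentence(text: str) -> bool:
--         return text.rstrip().endswith(('.', '!', '?'))
--
--     result = []
--     current = None
--     for chunk in (c.strip() for c in chunks):
--         if current is None: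
--             current = chunk
--         elif ((len(current) < min_length or not is_complete_sentence(current))
--               and (max_length is None or len(current) + len(chunk) + 1 <= max_length)):
--             current += ' ' + chunk
--         else:
--             result.append(current)
--             current = chunk
--     if current is not None:
--         result.append(current)
--     return result
-- ===== Notes on version B (the rewrite author's own statement) =====
-- stated objective: simpler
-- what changed: Replaced A's index-based outer while loop with a nested lookahead while loop by a single for-loop over the stripped chunks maintaining one running accumulator that is flushed when the merge condition fails.
import Mathlib
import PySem

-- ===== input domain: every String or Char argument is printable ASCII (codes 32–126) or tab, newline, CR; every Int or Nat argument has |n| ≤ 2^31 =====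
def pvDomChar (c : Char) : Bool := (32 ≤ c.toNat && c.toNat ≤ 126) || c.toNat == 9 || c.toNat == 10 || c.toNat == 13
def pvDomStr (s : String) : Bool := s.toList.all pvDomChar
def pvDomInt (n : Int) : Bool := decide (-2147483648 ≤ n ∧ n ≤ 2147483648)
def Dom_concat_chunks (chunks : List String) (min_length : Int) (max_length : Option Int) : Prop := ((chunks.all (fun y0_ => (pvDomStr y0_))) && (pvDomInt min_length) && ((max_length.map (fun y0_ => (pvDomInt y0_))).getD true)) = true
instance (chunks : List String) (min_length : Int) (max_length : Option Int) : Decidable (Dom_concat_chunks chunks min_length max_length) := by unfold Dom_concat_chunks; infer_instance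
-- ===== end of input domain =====

-- B rewrites A's index-based outer+inner while loops as a single fold over the stripped
-- chunks maintaining one running accumulator (objective: simpler); both are total, same return values.

-- ===== PORT A =====
-- text.rstrip().endswith(('.', '!', '?'))
def pvIsCompleteA (text : String) : Bool :=
  let r := PySem.Str.rstrip text
  PySem.Str.endswith r "." || PySem.Str.endswith r "!" || PySem.Str.endswith r "?"

-- the inner while loop of A: state (i, current_chunk); returns the state at loop exit.
-- chunks[i + 1] is read with pyGet?/getD ""; the guard i < len(chunks) - 1 keeps it in range.
-- The extra Nat argument is fuel, a pure totalizing guard: the caller passes chunks.length,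
-- which never runs out because each iteration needs i < len(chunks) - 1 and increments i.
def pvInnerA (chunks : List String) (min_length : Int) (max_length : Option Int) :
    Nat → Nat → String → Nat × String
  | 0, i, cur => (i, cur)
  | fuel + 1, i, cur =>
      if ((PySem.Str.len cur : Int) < min_length ∨ pvIsCompleteA cur = false)
          ∧ (i : Int) < (chunks.length : Int) - 1 then
        let next := PySem.Str.strip ((PySem.List.pyGet? chunks ((i : Int) + 1)).getD "")
        match max_length with
        | some m =>
            if (PySem.Str.len cur : Int) + (PySem.Str.len next : Int) + 1 > m then (i, cur)
            else pvInnerA chunks min_length max_length fuel (i + 1) (cur ++ " " ++ next)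
        | none => pvInnerA chunks min_length max_length fuel (i + 1) (cur ++ " " ++ next)
      else (i, cur)

-- the outer while loop of A; fuel chunks.length + 1 suffices since i advances every round
def pvOuterA (chunks : List String) (min_length : Int) (max_length : Option Int) :
    Nat → Nat → List String → List String
  | 0, _, acc => acc
  | fuel + 1, i, acc =>
      if (i : Int) < (chunks.length : Int) then
        let cur := PySem.Str.strip ((PySem.List.pyGet? chunks (i : Int)).getD "")
        let p := pvInnerA chunks min_length max_length chunks.length i cur
        pvOuterA chunks min_length max_length fuel (p.1 + 1) (acc ++ [p.2])
      else acc

def concat_chunks (chunks : List String) (min_length : Int) (max_length : Option Int) : List String :=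
  pvOuterA chunks min_length max_length (chunks.length + 1) 0 []

-- ===== PORT B =====
def pvIsCompleteB (text : String) : Bool :=
  let r := PySem.Str.rstrip text
  PySem.Str.endswith r "." || PySem.Str.endswith r "!" || PySem.Str.endswith r "?"

-- one step of B's single for-loop: state (result, current)
def pvStepB (min_length : Int) (max_length : Option Int)
    (st : List String × Option String) (chunk : String) : List String × Option String :=
  match st.2 with
  | none => (st.1, some chunk)
  | some cur =>
      if ((decide ((PySem.Str.len cur : Int) < min_length)) || !pvIsCompleteB cur)
         && (match max_length with
             | none => true
             | some m => decide ((PySem.Str.len cur : Int) + (PySem.Str.len chunk : Int) + 1 ≤ m)) then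
        (st.1, some (cur ++ " " ++ chunk))
      else (st.1 ++ [cur], some chunk)

def concat_chunks_alt (chunks : List String) (min_length : Int) (max_length : Option Int) : List String :=
  let st := (chunks.map PySem.Str.strip).foldl (pvStepB min_length max_length) ([], none)
  match st.2 with
  | none => st.1
  | some cur => st.1 ++ [cur]

-- ===== PRECONDITION & SPEC =====
def Spec_concat_chunks (chunks : List String) (min_length : Int) (max_length : Option Int) (out : List String) : Prop := out = concat_chunks_alt chunks min_length max_length
instance (chunks : List String) (min_length : Int) (max_length : Option Int) (out : List String) : Decidable (Spec_concat_chunks chunks min_length max_length out) := by unfold Spec_concat_chunks; infer_instance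

-- ===== CLAIM (what is proved, stated in full; the proofs are below) =====
def Claim_equal_concat_chunks : Prop := ∀ (chunks : List String) (min_length : Int) (max_length : Option Int), Dom_concat_chunks chunks min_length max_length → Spec_concat_chunks chunks min_length max_length (concat_chunks chunks min_length max_length)

-- ===== LEMMAS AND PROOFS =====

-- the shared merge condition: current is short/incomplete and the merged chunk fits
def pvCond (min_length : Int) (max_length : Option Int) (cur next : String) : Bool :=
  ((decide ((PySem.Str.len cur : Int) < min_length)) || !pvIsCompleteA cur)
  && (match max_length with
      | none => true
      | some m => decide ((PySem.Str.len cur : Int) + (PySem.Str.len next : Int) + 1 ≤ m))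

-- reference recursion both ports are reduced to
def pvSpec (min_length : Int) (max_length : Option Int) : String → List String → List String
  | cur, [] => [cur]
  | cur, c :: rest =>
      if pvCond min_length max_length cur c then
        pvSpec min_length max_length (cur ++ " " ++ c) rest
      else cur :: pvSpec min_length max_length c rest

theorem pvIsComplete_eq (t : String) : pvIsCompleteB t = pvIsCompleteA t := rfl

theorem pvCond_true_iff (min_length : Int) (max_length : Option Int) (cur next : String) :
    pvCond min_length max_length cur next = true ↔
      ((PySem.Str.len cur : Int) < min_length ∨ pvIsCompleteA cur = false)
      ∧ (∀ m, max_length = some m →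
          (PySem.Str.len cur : Int) + (PySem.Str.len next : Int) + 1 ≤ m) := by
  unfold pvCond
  cases max_length with
  | none => simp
  | some m => simp

def pvFinal (st : List String × Option String) : List String :=
  match st.2 with
  | none => st.1
  | some cur => st.1 ++ [cur]

theorem pvB_spec (min_length : Int) (max_length : Option Int) :
    ∀ (l : List String) (acc : List String) (cur : String),
      pvFinal (l.foldl (pvStepB min_length max_length) (acc, some cur))
        = acc ++ pvSpec min_length max_length cur l := by
  intro l
  induction l with
  | nil => intro acc cur; simp [pvFinal, pvSpec]
  | cons c rest ih =>
      intro acc cur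
      simp only [List.foldl_cons, pvStepB, pvIsComplete_eq]
      by_cases h : pvCond min_length max_length cur c = true
      · have h' := h
        unfold pvCond at h'
        simp only [h', ite_true, ih, pvSpec, h]
      · have h' : pvCond min_length max_length cur c = false := by
          revert h; cases pvCond min_length max_length cur c <;> simp
        have h'' := h'
        unfold pvCond at h''
        simp only [h'', Bool.false_eq_true, ite_false, ih, pvSpec, h', List.append_assoc,
          List.singleton_append]

theorem pvGetD_at (chunks : List String) (k : Nat) (hk : k < chunks.length) :
    (PySem.List.pyGet? chunks ((k : Nat) : Int)).getD "" = chunks[k] := by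
  rw [PySem.List.pyGet?_natCast, List.getElem?_eq_getElem hk, Option.getD_some]

-- the inner loop exits when the merge condition fails (or there is no next chunk), any fuel
theorem pvInnerA_stop (chunks : List String) (min_length : Int) (max_length : Option Int)
    (fuel i : Nat) (cur : String)
    (hc : ∀ _ : i + 1 < chunks.length,
        pvCond min_length max_length cur (PySem.Str.strip chunks[i + 1]) = false) :
    pvInnerA chunks min_length max_length fuel i cur = (i, cur) := by
  cases fuel with
  | zero => rfl
  | succ fuel =>
      rw [pvInnerA]
      by_cases hn : i + 1 < chunks.length
      · have hcf := hc hn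
        by_cases hs : ((PySem.Str.len cur : Int) < min_length ∨ pvIsCompleteA cur = false)
        · have hguard : ((PySem.Str.len cur : Int) < min_length ∨ pvIsCompleteA cur = false)
              ∧ (i : Int) < (chunks.length : Int) - 1 := ⟨hs, by omega⟩
          rw [if_pos hguard]
          have hget : (PySem.List.pyGet? chunks ((i : Int) + 1)).getD "" = chunks[i + 1] := by
            have : ((i : Int) + 1) = ((i + 1 : Nat) : Int) := by push_cast; ring
            rw [this, pvGetD_at chunks (i + 1) hn]
          dsimp only
          rw [hget]
          have hnottrue : ¬ pvCond min_length max_length cur (PySem.Str.strip chunks[i + 1]) = true := by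
            rw [hcf]; simp
          rw [pvCond_true_iff] at hnottrue
          cases hm : max_length with
          | none =>
              exfalso
              exact hnottrue ⟨hs, by intro m hmm; rw [hm] at hmm; cases hmm⟩
          | some m =>
              dsimp only
              have hbig : (PySem.Str.len cur : Int)
                  + (PySem.Str.len (PySem.Str.strip chunks[i + 1]) : Int) + 1 > m := by
                by_contra hle
                exact hnottrue ⟨hs, by intro m' hmm; rw [hm] at hmm; cases hmm; omega⟩
              rw [if_pos hbig]
        · rw [if_neg (by rintro ⟨h1, _⟩; exact hs h1)]
      · rw [if_neg (by rintro ⟨_, h2⟩; omega)]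

-- one extra unit of fuel is irrelevant once the fuel covers the remaining iterations
theorem pvInnerA_fuel (chunks : List String) (min_length : Int) (max_length : Option Int) :
    ∀ (fuel i : Nat) (cur : String), chunks.length - 1 - i ≤ fuel →
      pvInnerA chunks min_length max_length fuel i cur
        = pvInnerA chunks min_length max_length (fuel + 1) i cur := by
  intro fuel
  induction fuel with
  | zero =>
      intro i cur hf
      have hstop : ∀ h : i + 1 < chunks.length, False := by intro h; omega
      rw [pvInnerA_stop chunks min_length max_length 0 i cur (fun h => absurd h (hstop h).elim),
        pvInnerA_stop chunks min_length max_length 1 i cur (fun h => absurd h (hstop h).elim)]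
  | succ fuel ih =>
      intro i cur hf
      rw [pvInnerA]
      conv_rhs => rw [pvInnerA]
      by_cases hguard : ((PySem.Str.len cur : Int) < min_length ∨ pvIsCompleteA cur = false)
          ∧ (i : Int) < (chunks.length : Int) - 1
      · rw [if_pos hguard, if_pos hguard]
        have hrec := ih (i + 1)
        dsimp only
        cases max_length with
        | none => exact hrec _ (by omega)
        | some m =>
            dsimp only
            split_ifs with hbig
            · rfl
            · exact hrec _ (by omega)
      · rw [if_neg hguard, if_neg hguard]

-- the inner loop at full fuel takes one merge step when the merge condition holds
theorem pvInnerA_merge (chunks : List String) (min_length : Int) (max_length : Option Int)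
    (i : Nat) (cur : String) (hnext : i + 1 < chunks.length)
    (hc : pvCond min_length max_length cur (PySem.Str.strip chunks[i + 1]) = true) :
    pvInnerA chunks min_length max_length chunks.length i cur
      = pvInnerA chunks min_length max_length chunks.length (i + 1)
          (cur ++ " " ++ PySem.Str.strip chunks[i + 1]) := by
  rcases (pvCond_true_iff min_length max_length cur (PySem.Str.strip chunks[i + 1])).mp hc
    with ⟨hshort, hfits⟩
  have hguard : ((PySem.Str.len cur : Int) < min_length ∨ pvIsCompleteA cur = false)
      ∧ (i : Int) < (chunks.length : Int) - 1 := ⟨hshort, by omega⟩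
  obtain ⟨f, hfeq⟩ : ∃ f, chunks.length = f + 1 := ⟨chunks.length - 1, by omega⟩
  have hget : (PySem.List.pyGet? chunks ((i : Int) + 1)).getD "" = chunks[i + 1] := by
    have : ((i : Int) + 1) = ((i + 1 : Nat) : Int) := by push_cast; ring
    rw [this, pvGetD_at chunks (i + 1) hnext]
  have hstep : pvInnerA chunks min_length max_length (f + 1) i cur
      = pvInnerA chunks min_length max_length f (i + 1)
          (cur ++ " " ++ PySem.Str.strip chunks[i + 1]) := by
    rw [pvInnerA, if_pos hguard]
    dsimp only
    rw [hget]
    cases hm : max_length with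
    | none => rfl
    | some m =>
        have := hfits m hm
        dsimp only
        rw [if_neg (by omega)]
  rw [hfeq, hstep,
    pvInnerA_fuel chunks min_length max_length f (i + 1)
      (cur ++ " " ++ PySem.Str.strip chunks[i + 1]) (by omega)]

-- the inner loop never moves i backwards
theorem pvInnerA_fst_ge (chunks : List String) (min_length : Int) (max_length : Option Int) :
    ∀ (fuel i : Nat) (cur : String), i ≤ (pvInnerA chunks min_length max_length fuel i cur).1 := by
  intro fuel
  induction fuel with
  | zero => intro i cur; exact le_refl i
  | succ fuel ih =>
      intro i cur
      rw [pvInnerA]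
      split_ifs with hg
      · dsimp only
        cases max_length with
        | none => exact Nat.le_trans (Nat.le_succ _) (ih (i + 1) _)
        | some m =>
            dsimp only
            split_ifs with hbig
            · exact le_refl i
            · exact Nat.le_trans (Nat.le_succ _) (ih (i + 1) _)
      · exact le_refl i

-- one extra unit of outer fuel is irrelevant once the fuel covers the remaining rounds
theorem pvOuterA_fuel (chunks : List String) (min_length : Int) (max_length : Option Int) :
    ∀ (fuel i : Nat) (acc : List String), chunks.length ≤ i + fuel →
      pvOuterA chunks min_length max_length fuel i acc
        = pvOuterA chunks min_length max_length (fuel + 1) i acc := by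
  intro fuel
  induction fuel with
  | zero =>
      intro i acc hf
      rw [pvOuterA]
      conv_rhs => rw [pvOuterA]
      rw [if_neg (show ¬ ((i : Int) < (chunks.length : Int)) by omega)]
  | succ fuel ih =>
      intro i acc hf
      rw [pvOuterA]
      conv_rhs => rw [pvOuterA]
      by_cases hi : (i : Int) < (chunks.length : Int)
      · rw [if_pos hi, if_pos hi]
        dsimp only
        have := pvInnerA_fst_ge chunks min_length max_length chunks.length i
          (PySem.Str.strip ((PySem.List.pyGet? chunks (i : Int)).getD ""))
        exact ih _ _ (by omega)
      · rw [if_neg hi, if_neg hi]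

theorem pvA_spec (min_length : Int) (max_length : Option Int) (chunks : List String) :
    ∀ (n i : Nat) (cur : String) (acc : List String),
      chunks.length ≤ i + n → i < chunks.length →
      pvOuterA chunks min_length max_length n
          ((pvInnerA chunks min_length max_length chunks.length i cur).1 + 1)
          (acc ++ [(pvInnerA chunks min_length max_length chunks.length i cur).2])
        = acc ++ pvSpec min_length max_length cur ((chunks.drop (i + 1)).map PySem.Str.strip) := by
  intro n
  induction n with
  | zero => intro i cur acc hn hi; omega
  | succ n ih =>
      intro i cur acc hn hi
      by_cases hnext : i + 1 < chunks.length
      · have hdrop : chunks.drop (i + 1) = chunks[i + 1] :: chunks.drop (i + 2) :=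
          List.drop_eq_getElem_cons hnext
        have hmap : (chunks.drop (i + 1)).map PySem.Str.strip
            = PySem.Str.strip chunks[i + 1] :: (chunks.drop (i + 2)).map PySem.Str.strip := by
          rw [hdrop]; rfl
        by_cases hc : pvCond min_length max_length cur (PySem.Str.strip chunks[i + 1]) = true
        · -- merge step: the inner loop absorbs the next chunk; one outer fuel unit is dropped first
          rw [pvInnerA_merge chunks min_length max_length i cur hnext hc, hmap, pvSpec, if_pos hc]
          have hge := pvInnerA_fst_ge chunks min_length max_length chunks.length (i + 1)
              (cur ++ " " ++ PySem.Str.strip chunks[i + 1])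
          have hfo : pvOuterA chunks min_length max_length (n + 1)
                ((pvInnerA chunks min_length max_length chunks.length (i + 1)
                    (cur ++ " " ++ PySem.Str.strip chunks[i + 1])).1 + 1)
                (acc ++ [(pvInnerA chunks min_length max_length chunks.length (i + 1)
                    (cur ++ " " ++ PySem.Str.strip chunks[i + 1])).2])
              = pvOuterA chunks min_length max_length n
                ((pvInnerA chunks min_length max_length chunks.length (i + 1)
                    (cur ++ " " ++ PySem.Str.strip chunks[i + 1])).1 + 1)
                (acc ++ [(pvInnerA chunks min_length max_length chunks.length (i + 1)
                    (cur ++ " " ++ PySem.Str.strip chunks[i + 1])).2]) := by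
            exact (pvOuterA_fuel chunks min_length max_length n _ _ (by omega)).symm
          rw [hfo]
          exact ih (i + 1) (cur ++ " " ++ PySem.Str.strip chunks[i + 1]) acc (by omega) hnext
        · -- flush step: the inner loop exits at (i, cur), the outer loop restarts at i + 1
          have hcf : pvCond min_length max_length cur (PySem.Str.strip chunks[i + 1]) = false := by
            revert hc; cases pvCond min_length max_length cur (PySem.Str.strip chunks[i + 1]) <;> simp
          rw [pvInnerA_stop chunks min_length max_length chunks.length i cur (fun _ => hcf)]
          rw [pvOuterA]
          have hi1 : ((i + 1 : Nat) : Int) < (chunks.length : Int) := by push_cast; omega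
          rw [if_pos hi1]
          dsimp only
          rw [pvGetD_at chunks (i + 1) hnext]
          have := ih (i + 1) (PySem.Str.strip chunks[i + 1]) (acc ++ [cur]) (by omega) hnext
          rw [this, hmap, pvSpec, if_neg (by rw [hcf]; simp)]
          simp
      · -- i is the last index: the inner guard is false, the outer loop then stops
        have hstop := pvInnerA_stop chunks min_length max_length chunks.length i cur
          (fun h => absurd h hnext)
        rw [hstop]
        dsimp only
        rw [pvOuterA]
        rw [if_neg (by push_cast; omega)]
        rw [List.drop_eq_nil_of_le (by omega)]
        simp [pvSpec]

-- ===== VERDICT (by name: the statement is the Claim_ definition above) =====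
theorem concat_chunks_spec : Claim_equal_concat_chunks := by
  intro chunks min_length max_length _
  unfold Spec_concat_chunks concat_chunks concat_chunks_alt
  cases chunks with
  | nil => rw [pvOuterA]; simp
  | cons h t =>
      rw [pvOuterA]
      rw [if_pos (show ((0 : Nat) : Int) < (((h :: t).length : Nat) : Int) by push_cast [List.length_cons]; omega)]
      dsimp only
      rw [show (PySem.List.pyGet? (h :: t) ((0 : Nat) : Int)).getD "" = h from
        pvGetD_at (h :: t) 0 (by simp)]
      have hA := pvA_spec min_length max_length (h :: t) (h :: t).length 0
          (PySem.Str.strip h) [] (by omega) (by simp)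
      simp only [List.nil_append, zero_add, List.drop_one, List.tail_cons] at hA
      simp only [List.nil_append]
      rw [hA]
      have hB := pvB_spec min_length max_length (t.map PySem.Str.strip) [] (PySem.Str.strip h)
      simp only [List.nil_append] at hB
      rw [← hB]
      simp only [List.map_cons, List.foldl_cons]
      rfl
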